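-- pv_equiv track=rewrite | github.com/xsarmalenka/AdventOfCode | Advent of Code 2024/Day 9/day9_part1.py | sort_block
-- ===== SOURCE A (Python) =====
-- def contains_non_dot(block, start_index):
--     for item in block[start_index:]:
--         if item != ".": return True
--     return False
--
-- def sort_block(block):
--     test_block = list(block)
--     last_index_to_move = 0
--
--     for i, item in enumerate(test_block):
--         move = True
--         if item == ".":
--             if last_index_to_move == 0: index_item_to_move = len(test_block)-1
--             else: last_index_to_move -= 1
--
--             item_to_move = test_block[index_item_to_move]
--             move = contains_non_dot(test_block, i)
--             if move == True:
--                 while(item_to_move == "."):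
--                     index_item_to_move -= 1
--                     item_to_move = test_block[index_item_to_move]
--
--                 test_block[i] = item_to_move
--                 test_block[index_item_to_move] = "."
--                 if last_index_to_move == 0:
--                     last_index_to_move = index_item_to_move
--             else: break
--
--     return test_block
-- ===== SOURCE B (Python) =====
-- def sort_block(block):
--     res = list(block)
--     i, j = 0, len(res) - 1
--     while i < j:
--         if res[i] != ".":
--             i += 1
--         elif res[j] == ".":
--             j -= 1
--         else:
--             res[i], res[j] = res[j], res[i]
--             i += 1
--             j -= 1
--     return res
-- ===== Notes on version B (the rewrite author's own statement) =====
-- stated objective: alternative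
-- what changed: Replaced A's per-dot rescan (enumerate with contains_non_dot scanning the whole suffix, a while-loop re-walking trailing dots, and last_index_to_move bookkeeping) by a single two-pointer inward sweep that swaps the rightmost non-dot into the leftmost dot.
import Mathlib
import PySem

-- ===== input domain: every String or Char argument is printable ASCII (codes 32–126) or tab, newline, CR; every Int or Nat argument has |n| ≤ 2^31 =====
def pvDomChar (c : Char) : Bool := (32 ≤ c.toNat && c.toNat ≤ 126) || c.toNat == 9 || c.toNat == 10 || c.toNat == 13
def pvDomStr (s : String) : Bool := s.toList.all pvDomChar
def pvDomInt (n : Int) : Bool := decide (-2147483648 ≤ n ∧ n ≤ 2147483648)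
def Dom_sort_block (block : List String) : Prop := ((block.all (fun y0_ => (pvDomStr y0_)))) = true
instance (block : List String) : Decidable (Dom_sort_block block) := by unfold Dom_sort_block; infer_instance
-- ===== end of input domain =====

-- B replaces A's per-dot rescan-from-the-right compaction (suffix scan + while-walk + last_index bookkeeping) by a single two-pointer inward sweep; return values agree on all inputs.

-- ===== PORT A =====
-- for item in block[start_index:]: if item != ".": return True / return False
def contains_non_dot (block : List String) (start_index : Int) : Bool :=
  (PySem.List.slice block (some start_index) none).any (fun item => item != ".")

-- while(item_to_move == "."): index_item_to_move -= 1; item_to_move = test_block[index_item_to_move]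
-- (fuel only makes the loop total; with tb.length fuel it is exact on every state A reaches)
def skipDots (tb : List String) (idx : Int) (item : String) : Nat → Int × String
  | 0 => (idx, item)
  | fuel + 1 =>
    if item == "." then
      skipDots tb (idx - 1) (PySem.List.pyGetD tb (idx - 1) "") fuel
    else (idx, item)

-- the 'for i, item in enumerate(test_block)' loop, with the break returning the list
def aLoop (tb : List String) (last idx : Int) (i : Nat) : List String :=
  if i < tb.length then
    let item := tb.getD i ""           -- enumerate: index always in range
    if item != "." then aLoop tb last idx (i + 1)
    else
      let li : Int × Int := if last == 0 then (last, (tb.length : Int) - 1) else (last - 1, idx)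
      let item_to_move := PySem.List.pyGetD tb li.2 ""
      if contains_non_dot tb (i : Int) then
        let p := skipDots tb li.2 item_to_move tb.length
        let tb' := PySem.List.pySetD (PySem.List.pySetD tb (i : Int) p.2) p.1 "."
        let last2 := if li.1 == 0 then p.1 else li.1
        aLoop tb' last2 p.1 (i + 1)
      else tb
  else tb
termination_by tb.length - i
decreasing_by all_goals first | omega | (simp [PySem.List.length_pySetD]; omega)

def sort_block (block : List String) : List String :=
  aLoop block 0 0 0

-- ===== PORT B =====
def bLoop (res : List String) (i j : Int) : List String :=
  if i < j then
    if PySem.List.pyGetD res i "" != "." then bLoop res (i + 1) j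
    else if PySem.List.pyGetD res j "" == "." then bLoop res i (j - 1)
    else
      bLoop (PySem.List.pySetD (PySem.List.pySetD res i (PySem.List.pyGetD res j ""))
              j (PySem.List.pyGetD res i "")) (i + 1) (j - 1)
  else res
termination_by (j - i).toNat
decreasing_by all_goals omega

def sort_block_alt (block : List String) : List String :=
  bLoop block 0 ((block.length : Int) - 1)

-- ===== PRECONDITION & SPEC =====
def Spec_sort_block (block : List String) (out : List String) : Prop := out = sort_block_alt block
instance (block : List String) (out : List String) : Decidable (Spec_sort_block block out) := by unfold Spec_sort_block; infer_instance

-- ===== CLAIM (what is proved, stated in full; the proofs are below) =====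
def Claim_equal_sort_block : Prop := ∀ (block : List String), Dom_sort_block block → Spec_sort_block block (sort_block block)

-- ===== LEMMAS AND PROOFS =====

-- all positions strictly right of v are "."
def Dots (tb : List String) (v : Int) : Prop :=
  ∀ m : Nat, v < (m : Int) → m < tb.length → tb.getD m "" = "."

theorem skip_eval (tb : List String) (R : Nat) (hR : tb.getD R "" ≠ ".")
    (hRn : R < tb.length) :
    ∀ (fuel e : Nat), R ≤ e → e < tb.length → e - R ≤ fuel →
    (∀ m : Nat, R < m → m ≤ e → tb.getD m "" = ".") →
    skipDots tb (e : Int) (tb.getD e "") fuel = ((R : Int), tb.getD R "") := by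
  intro fuel
  induction fuel with
  | zero =>
    intro e hRe hen hf _
    have : e = R := by omega
    subst this
    simp [skipDots]
  | succ fuel ih =>
    intro e hRe hen hf hdots
    by_cases heR : e = R
    · subst heR
      rw [skipDots]
      simp only [beq_iff_eq, if_neg hR]
    · have heR' : R < e := by omega
      have hdot : tb.getD e "" = "." := hdots e heR' (le_refl e)
      have hstep : ((e : Int) - 1) = ((e - 1 : Nat) : Int) := by omega
      have hget : PySem.List.pyGetD tb ((e : Int) - 1) "" = tb.getD (e - 1) "" := by
        rw [hstep]; simp [PySem.List.pyGetD_natCast]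
      rw [skipDots]
      simp only [hdot]
      rw [if_pos (by simp), hget, hstep]
      exact ih (e - 1) (by omega) (by omega) (by omega)
        (fun m hm hm' => hdots m hm (by omega))

theorem bLoop_all_dots (tb : List String) :
    ∀ (k : Nat) (j : Int) (i : Nat), (j - (i : Int)).toNat ≤ k → j < (tb.length : Int) →
    (∀ m : Nat, i ≤ m → m < tb.length → tb.getD m "" = ".") →
    bLoop tb (i : Int) j = tb := by
  intro k
  induction k with
  | zero =>
    intro j i hk _ _
    rw [bLoop, if_neg (by omega)]
  | succ k ih =>
    intro j i hk hjn hall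
    by_cases hij : (i : Int) < j
    · have hi_n : i < tb.length := by omega
      have h1 : PySem.List.pyGetD tb (i : Int) "" = tb.getD i "" := by
        simp [PySem.List.pyGetD_natCast]
      have h2 : PySem.List.pyGetD tb j "" = tb.getD j.toNat "" :=
        PySem.List.pyGetD_of_nonneg tb "" (by omega)
      have hdi : tb.getD i "" = "." := hall i (le_refl i) hi_n
      have hdj : tb.getD j.toNat "" = "." := hall j.toNat (by omega) (by omega)
      rw [bLoop, if_pos hij, h1, hdi]
      rw [if_neg (by simp), h2, hdj, if_pos (by simp)]
      exact ih (j - 1) i (by omega) (by omega) hall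
    · rw [bLoop, if_neg hij]

theorem bLoop_swap_step (tb : List String) (i R : Nat) (hiR : i < R) (_hRn : R < tb.length)
    (hi : tb.getD i "" = ".") (hR : tb.getD R "" ≠ ".") :
    bLoop tb (i : Int) (R : Int) =
      bLoop ((tb.set i (tb.getD R "")).set R (tb.getD i "")) ((i : Int) + 1) ((R : Int) - 1) := by
  have h1 : PySem.List.pyGetD tb (i : Int) "" = tb.getD i "" := by
    simp [PySem.List.pyGetD_natCast]
  have h2 : PySem.List.pyGetD tb (R : Int) "" = tb.getD R "" := by
    simp [PySem.List.pyGetD_natCast]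
  rw [bLoop, if_pos (by omega), h1]
  rw [if_neg (by rw [hi]; decide), h2, if_neg (by simpa using hR)]
  simp [PySem.List.pySetD_natCast]

theorem bLoop_skip_swap (tb : List String) (i R : Nat) (hiR : i < R) (hRn : R < tb.length)
    (hi : tb.getD i "" = ".") (hR : tb.getD R "" ≠ ".") :
    ∀ (k j : Nat), j - R ≤ k → R ≤ j → j < tb.length →
    (∀ m : Nat, R < m → m ≤ j → tb.getD m "" = ".") →
    bLoop tb (i : Int) (j : Int) =
      bLoop ((tb.set i (tb.getD R "")).set R (tb.getD i "")) ((i : Int) + 1) ((R : Int) - 1) := by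
  intro k
  induction k with
  | zero =>
    intro j hk hRj _ _
    have hjR : j = R := by omega
    rw [hjR]
    exact bLoop_swap_step tb i R hiR hRn hi hR
  | succ k ih =>
    intro j hk hRj hjn hdots
    by_cases hjR : j = R
    · rw [hjR]
      exact bLoop_swap_step tb i R hiR hRn hi hR
    · have hRj' : R < j := by omega
      have h1 : PySem.List.pyGetD tb (i : Int) "" = tb.getD i "" := by
        simp [PySem.List.pyGetD_natCast]
      have h2 : PySem.List.pyGetD tb (j : Int) "" = tb.getD j "" := by
        simp [PySem.List.pyGetD_natCast]
      have hdj : tb.getD j "" = "." := hdots j hRj' (le_refl j)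
      rw [bLoop, if_pos (by omega), h1]
      rw [if_neg (by rw [hi]; decide), h2, hdj, if_pos (by simp)]
      rw [show (j : Int) - 1 = ((j - 1 : Nat) : Int) by omega]
      exact ih (j - 1) (by omega) (by omega) (by omega)
        (fun m hm hm' => hdots m hm (by omega))

theorem aLoop_finish (tb : List String) (last idx : Int) (i : Nat)
    (h : ∀ m : Nat, i ≤ m → m < tb.length → tb.getD m "" = ".") :
    aLoop tb last idx i = tb := by
  by_cases hi : i < tb.length
  · have hdi : tb.getD i "" = "." := h i (le_refl i) hi
    have hcnd : contains_non_dot tb (i : Int) = false := by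
      unfold contains_non_dot
      rw [PySem.List.slice_from_natCast]
      rw [List.any_eq_false]
      intro x hx
      obtain ⟨m, hm, rfl⟩ := List.getElem_of_mem hx
      have hdl : (tb.drop i).length = tb.length - i := by simp
      rw [List.getElem_drop]
      have hlt : i + m < tb.length := by omega
      have hd := h (i + m) (by omega) hlt
      rw [List.getD_eq_getElem tb "" hlt] at hd
      simp [hd]
    rw [aLoop]
    simp only [if_pos hi, hdi]
    rw [if_neg (by simp), if_neg (by simp [hcnd])]
  · rw [aLoop, if_neg hi]

theorem all_dots_of_contains_false (tb : List String) (i : Nat)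
    (h : contains_non_dot tb (i : Int) = false) :
    ∀ m : Nat, i ≤ m → m < tb.length → tb.getD m "" = "." := by
  intro m him hmn
  unfold contains_non_dot at h
  rw [PySem.List.slice_from_natCast, List.any_eq_false] at h
  have hx : tb[m]'hmn ∈ tb.drop i := by
    rw [List.mem_iff_getElem]
    refine ⟨m - i, by simp; omega, ?_⟩
    rw [List.getElem_drop]
    congr 1
    omega
  have := h _ hx
  rw [List.getD_eq_getElem tb "" hmn]
  simpa using this

theorem getD_set_set (tb : List String) (i R m : Nat) (vi vR : String)
    (hmn : m < tb.length) :
    ((tb.set i vi).set R vR).getD m "" =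
      if m = R then vR else if m = i then vi else tb.getD m "" := by
  have h1 : m < ((tb.set i vi).set R vR).length := by simp [hmn]
  rw [List.getD_eq_getElem _ "" h1, List.getD_eq_getElem tb "" hmn]
  simp [List.getElem_set]
  split_ifs <;> first | rfl | omega

theorem couple : ∀ (k : Nat) (tb : List String) (last idx : Int) (i : Nat) (j : Int),
    tb.length - i ≤ k →
    Dots tb j → j < (tb.length : Int) →
    (last ≠ 0 → Dots tb idx ∧ 0 ≤ idx ∧ idx < (tb.length : Int)) →
    aLoop tb last idx i = bLoop tb (i : Int) j := by
  intro k
  induction k with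
  | zero =>
    intro tb last idx i j hk _ hjn _
    rw [aLoop, if_neg (by omega)]
    exact (bLoop_all_dots tb (j - (i : Int)).toNat j i (le_refl _) hjn
      (fun m hm hmn => absurd hmn (by omega))).symm
  | succ k ih =>
    intro tb last idx i j hk hD hjn hI
    by_cases hi : i < tb.length
    · by_cases hitem : tb.getD i "" = "."
      · by_cases hcnd : contains_non_dot tb (i : Int) = true
        · -- a non-dot exists right of i: both sides swap it into position i
          have hw : ∃ m0 : Nat, i ≤ m0 ∧ m0 < tb.length ∧ tb.getD m0 "" ≠ "." := by
            unfold contains_non_dot at hcnd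
            rw [PySem.List.slice_from_natCast, List.any_eq_true] at hcnd
            obtain ⟨x, hx, hxne⟩ := hcnd
            obtain ⟨m, hm, rfl⟩ := List.getElem_of_mem hx
            have hdl : (tb.drop i).length = tb.length - i := by simp
            refine ⟨i + m, by omega, by omega, ?_⟩
            rw [List.getD_eq_getElem tb "" (by omega)]
            simpa using hxne
          obtain ⟨m0, hm0i, hm0n, hm0ne⟩ := hw
          have hRP : tb.getD (Nat.findGreatest (fun m => tb.getD m "" ≠ ".") (tb.length - 1)) "" ≠ "." :=
            Nat.findGreatest_spec (P := fun m => tb.getD m "" ≠ ".") (n := tb.length - 1)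
              (show m0 ≤ tb.length - 1 by omega) hm0ne
          generalize hRdef : Nat.findGreatest (fun m => tb.getD m "" ≠ ".") (tb.length - 1) = R at hRP
          have hRle : R ≤ tb.length - 1 := hRdef ▸ Nat.findGreatest_le _
          have hmax : ∀ m : Nat, R < m → m < tb.length → tb.getD m "" = "." := by
            intro m hm hmn
            by_contra hne
            have hgt : Nat.findGreatest (fun m => tb.getD m "" ≠ ".") (tb.length - 1) < m := by
              rw [hRdef]; exact hm
            exact Nat.findGreatest_is_greatest hgt (by omega) hne
          have hRge : i ≤ R := by
            have h := Nat.le_findGreatest (P := fun m => tb.getD m "" ≠ ".")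
              (show m0 ≤ tb.length - 1 by omega) hm0ne
            rw [hRdef] at h
            omega
          have hiR : i < R := lt_of_le_of_ne hRge (fun h => hRP (h ▸ hitem))
          have hRn : R < tb.length := by omega
          have hjR : (R : Int) ≤ j := by
            by_contra hlt
            push Not at hlt
            exact hRP (hD R (by omega) hRn)
          obtain ⟨eN, he_cast, heR, heN⟩ :
              ∃ eN : Nat,
                (if last == 0 then (last, (tb.length : Int) - 1) else (last - 1, idx)).2 = (eN : Int) ∧
                R ≤ eN ∧ eN < tb.length := by
            by_cases hl : last = 0
            · refine ⟨tb.length - 1, ?_, by omega, by omega⟩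
              simp [hl]
              omega
            · obtain ⟨hDidx, hidx0, hidxn⟩ := hI hl
              refine ⟨idx.toNat, ?_, ?_, by omega⟩
              · simp [hl]
                omega
              · by_contra hlt
                push Not at hlt
                exact hRP (hDidx R (by omega) hRn)
          have hskip : skipDots tb (eN : Int) (tb.getD eN "") tb.length = ((R : Int), tb.getD R "") :=
            skip_eval tb R hRP hRn tb.length eN heR heN (by omega)
              (fun m hm hm' => hmax m hm (by omega))
          rw [aLoop]
          simp only [if_pos hi, hitem]
          rw [if_neg (by decide), if_pos hcnd]
          simp only [he_cast, PySem.List.pyGetD_natCast, hskip, PySem.List.pySetD_natCast]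
          rw [show j = ((j.toNat : Nat) : Int) by omega]
          rw [bLoop_skip_swap tb i R hiR hRn hitem hRP (j.toNat - R) j.toNat (by omega)
            (by omega) (by omega) (fun m hm hm' => hmax m hm (by omega))]
          rw [hitem]
          rw [show (i : Int) + 1 = ((i + 1 : Nat) : Int) by omega]
          have hlen : ((tb.set i (tb.getD R "")).set R ".").length = tb.length := by simp
          have hDots' : Dots ((tb.set i (tb.getD R "")).set R ".") ((R : Int) - 1) := by
            intro m hm hmn
            rw [hlen] at hmn
            rw [getD_set_set tb i R m _ _ hmn]
            by_cases hmR : m = R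
            · simp [hmR]
            · rw [if_neg hmR, if_neg (by omega)]
              exact hmax m (by omega) hmn
          apply ih
          · rw [hlen]; omega
          · exact hDots'
          · rw [hlen]; omega
          · intro _
            refine ⟨fun m hm hmn => hDots' m (by omega) hmn, by omega, by rw [hlen]; omega⟩
        · -- nothing right of i to move: A breaks, B's pointers cross with no change
          rw [aLoop]
          simp only [if_pos hi, hitem]
          rw [if_neg (by decide), if_neg (by simp [hcnd])]
          exact (bLoop_all_dots tb (j - (i : Int)).toNat j i (le_refl _) hjn
            (all_dots_of_contains_false tb i (by simpa using hcnd))).symm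
      · -- non-dot at i: both sides step over it
        have hij : (i : Int) ≤ j := by
          by_contra h
          push Not at h
          exact hitem (hD i (by omega) hi)
        rw [aLoop]
        simp only [if_pos hi]
        rw [if_pos (bne_iff_ne.mpr hitem)]
        by_cases hlt : (i : Int) < j
        · rw [bLoop, if_pos hlt]
          have h1 : PySem.List.pyGetD tb (i : Int) "" = tb.getD i "" := by
            simp [PySem.List.pyGetD_natCast]
          rw [h1, if_pos (bne_iff_ne.mpr hitem)]
          rw [show (i : Int) + 1 = ((i + 1 : Nat) : Int) by omega]
          exact ih tb last idx (i + 1) j (by omega) hD hjn hI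
        · rw [bLoop, if_neg hlt]
          exact aLoop_finish tb last idx (i + 1) (fun m hm hmn => hD m (by omega) hmn)
    · rw [aLoop, if_neg hi]
      exact (bLoop_all_dots tb (j - (i : Int)).toNat j i (le_refl _) hjn
        (fun m hm hmn => absurd hmn (by omega))).symm

-- ===== VERDICT (by name: the statement is the Claim_ definition above) =====
theorem sort_block_spec : Claim_equal_sort_block := by
  intro block _
  unfold Spec_sort_block sort_block sort_block_alt
  have := couple block.length block 0 0 0 ((block.length : Int) - 1)
    (by omega) (by intro m hm hm'; omega) (by omega) (by simp)
  simpa using this
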